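-- pv_equiv track=rewrite | github.com/Seth9976/gitingest_self | src/gitingest/query_ingestion.py | _sort_children
-- ===== SOURCE A (Python) =====
-- from typing import Any
--
-- def _sort_children(children: list[dict[str, Any]]) -> list[dict[str, Any]]:
--     """
--     Sort children nodes with:
--     1. README.md first
--     2. Regular files (not starting with dot)
--     3. Hidden files (starting with dot)
--     4. Regular directories (not starting with dot)
--     5. Hidden directories (starting with dot)
--     All groups are sorted alphanumerically within themselves.
--
--     Parameters
--     ----------
--     children : list[dict[str, Any]]
--         List of file and directory nodes to sort.
--
--     Returns
--     -------
--     list[dict[str, Any]]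
--         Sorted list according to the specified order.
--     """
--     # Separate files and directories
--     files = [child for child in children if child["type"] == "file"]
--     directories = [child for child in children if child["type"] == "directory"]
--
--     # Find README.md
--     readme_files = [f for f in files if f["name"].lower() == "readme.md"]
--     other_files = [f for f in files if f["name"].lower() != "readme.md"]
--
--     # Separate hidden and regular files/directories
--     regular_files = [f for f in other_files if not f["name"].startswith(".")]
--     hidden_files = [f for f in other_files if f["name"].startswith(".")]
--     regular_dirs = [d for d in directories if not d["name"].startswith(".")]
--     hidden_dirs = [d for d in directories if d["name"].startswith(".")]
--
--     # Sort each group alphanumerically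
--     regular_files.sort(key=lambda x: x["name"])
--     hidden_files.sort(key=lambda x: x["name"])
--     regular_dirs.sort(key=lambda x: x["name"])
--     hidden_dirs.sort(key=lambda x: x["name"])
--
--     # Combine all groups in the desired order
--     return readme_files + regular_files + hidden_files + regular_dirs + hidden_dirs
-- ===== SOURCE B (Python) =====
-- from typing import Any
--
-- def _sort_children(children: list[dict[str, Any]]) -> list[dict[str, Any]]:
--     """One stable sort: rank 0 README.md (input order kept), 1/2 regular/hidden
--     files by name, 3/4 regular/hidden directories by name."""
--     def key(child):
--         name = child["name"]
--         if child["type"] == "file":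
--             if name.lower() == "readme.md":
--                 return (0, "")
--             return (2 if name.startswith(".") else 1, name)
--         return (4 if name.startswith(".") else 3, name)
--
--     return sorted(
--         (c for c in children if c["type"] in ("file", "directory")),
--         key=key,
--     )
-- ===== Notes on version B (the rewrite author's own statement) =====
-- stated objective: simpler
-- what changed: Replaces the six partitioning comprehensions, four separate in-place sorts and five-way concatenation by a single stable sorted() over a rank/name composite key (README rank 0 with constant secondary so input order is kept).
import Mathlib
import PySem

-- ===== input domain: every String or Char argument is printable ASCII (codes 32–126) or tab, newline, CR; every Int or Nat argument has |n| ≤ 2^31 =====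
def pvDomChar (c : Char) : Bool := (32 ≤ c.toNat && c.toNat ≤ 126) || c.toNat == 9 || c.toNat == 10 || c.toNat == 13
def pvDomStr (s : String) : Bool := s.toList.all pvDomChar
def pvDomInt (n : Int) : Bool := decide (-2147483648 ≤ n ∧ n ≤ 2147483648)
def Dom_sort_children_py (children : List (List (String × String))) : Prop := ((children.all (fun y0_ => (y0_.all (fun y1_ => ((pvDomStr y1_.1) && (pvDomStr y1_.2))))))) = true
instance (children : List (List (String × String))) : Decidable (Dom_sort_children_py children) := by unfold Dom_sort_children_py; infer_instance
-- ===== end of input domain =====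

-- B replaces A's six comprehensions + four sorts + concatenation by one stable keyed sort; same cost, fewer moving parts.
-- dicts are association lists; child["k"] is first-match lookup (pvGetS; total via getD "" — Pre_ excludes the KeyError inputs).

-- ===== PORT A =====
def pvGetS (c : List (String × String)) (k : String) : String := (List.lookup k c).getD ""

def sort_children_py (children : List (List (String × String))) : List (List (String × String)) :=
  let files := children.filter (fun c => pvGetS c "type" == "file")
  let directories := children.filter (fun c => pvGetS c "type" == "directory")
  let readme_files := files.filter (fun f => PySem.Str.lower (pvGetS f "name") == "readme.md")
  let other_files := files.filter (fun f => !(PySem.Str.lower (pvGetS f "name") == "readme.md"))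
  let regular_files := other_files.filter (fun f => !(PySem.Str.startswith (pvGetS f "name") "."))
  let hidden_files := other_files.filter (fun f => PySem.Str.startswith (pvGetS f "name") ".")
  let regular_dirs := directories.filter (fun d => !(PySem.Str.startswith (pvGetS d "name") "."))
  let hidden_dirs := directories.filter (fun d => PySem.Str.startswith (pvGetS d "name") ".")
  readme_files
    ++ PySem.List.sorted regular_files (fun x => pvGetS x "name") false
    ++ PySem.List.sorted hidden_files (fun x => pvGetS x "name") false
    ++ PySem.List.sorted regular_dirs (fun x => pvGetS x "name") false
    ++ PySem.List.sorted hidden_dirs (fun x => pvGetS x "name") false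

-- ===== PORT B =====
-- key(child) = (rank, secondary): rank 0 README (secondary ""), 1/2 regular/hidden file, 3/4 regular/hidden directory
def pvRankB (c : List (String × String)) : Int :=
  let name := pvGetS c "name"
  if pvGetS c "type" == "file" then
    if PySem.Str.lower name == "readme.md" then 0
    else if PySem.Str.startswith name "." then 2 else 1
  else
    if PySem.Str.startswith name "." then 4 else 3

def pvSecB (c : List (String × String)) : String :=
  let name := pvGetS c "name"
  if pvGetS c "type" == "file" && (PySem.Str.lower name == "readme.md") then "" else name

def sort_children_py_alt (children : List (List (String × String))) : List (List (String × String)) :=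
  PySem.List.sorted2
    (children.filter (fun c => pvGetS c "type" == "file" || pvGetS c "type" == "directory"))
    pvRankB pvSecB false

-- ===== PRECONDITION & SPEC =====
-- Pre_ excludes exactly the KeyError inputs: every child needs a "type" key, and files/directories need a "name" key.
def Pre_sort_children_py (children : List (List (String × String))) : Prop :=
  ∀ c ∈ children, (List.lookup "type" c).isSome = true ∧
    ((pvGetS c "type" = "file" ∨ pvGetS c "type" = "directory") → (List.lookup "name" c).isSome = true)
instance (children : List (List (String × String))) : Decidable (Pre_sort_children_py children) := by unfold Pre_sort_children_py; infer_instance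

def pvWitness_sort_children_py : (List (List (String × String))) :=
  [[("type", "file"), ("name", "README.md")], [("type", "directory"), ("name", "src")], [("type", "file"), ("name", ".env")]]

def Spec_sort_children_py (children : List (List (String × String))) (out : List (List (String × String))) : Prop := out = sort_children_py_alt children
instance (children : List (List (String × String))) (out : List (List (String × String))) : Decidable (Spec_sort_children_py children out) := by unfold Spec_sort_children_py; infer_instance

-- ===== CLAIM (what is proved, stated in full; the proofs are below) =====
def Claim_equal_sort_children_py : Prop := ∀ (children : List (List (String × String))), Dom_sort_children_py children → Pre_sort_children_py children → Spec_sort_children_py children (sort_children_py children)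

-- ===== LEMMAS AND PROOFS =====

-- comparator of B's single sort (what sorted2 folds with) and of A's per-group sorts
def pvLexB (a b : List (String × String)) : Bool :=
  decide (pvRankB a < pvRankB b) || (!decide (pvRankB b < pvRankB a) && decide (pvSecB a < pvSecB b))
def pvNameB (a b : List (String × String)) : Bool :=
  decide (pvGetS a "name" < pvGetS b "name")

theorem pvSec_of_rank_ne_zero (c : List (String × String)) (h : pvRankB c ≠ 0) :
    pvSecB c = pvGetS c "name" := by
  by_cases t : (pvGetS c "type" == "file") = true
  · by_cases r : (PySem.Str.lower (pvGetS c "name") == "readme.md") = true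
    · exfalso; apply h; simp [pvRankB, t, r]
    · simp [pvSecB, t, r]
  · simp [pvSecB, t]

theorem pvSec_of_rank_zero (c : List (String × String)) (h : pvRankB c = 0) : pvSecB c = "" := by
  by_cases t : (pvGetS c "type" == "file") = true
  · by_cases r : (PySem.Str.lower (pvGetS c "name") == "readme.md") = true
    · simp [pvSecB, t, r]
    · exfalso; simp only [pvRankB, t, r] at h; split_ifs at h <;> omega
  · exfalso; simp only [pvRankB, t] at h; split_ifs at h <;> omega

theorem pvRank_cases (c : List (String × String)) :
    pvRankB c = 0 ∨ pvRankB c = 1 ∨ pvRankB c = 2 ∨ pvRankB c = 3 ∨ pvRankB c = 4 := by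
  by_cases t : (pvGetS c "type" == "file") = true
  · by_cases r : (PySem.Str.lower (pvGetS c "name") == "readme.md") = true
    · simp [pvRankB, t, r]
    · simp only [pvRankB, t, r]; split_ifs <;> norm_num
  · simp only [pvRankB, t]; split_ifs <;> norm_num

-- insertBy facts specific to these comparators
theorem insertBy_front {α : Type} (before : α → α → Bool) (x : α) (rest : List α)
    (h : ∀ z ∈ rest, before x z = true) :
    PySem.List.insertBy before x rest = x :: rest := by
  cases rest with
  | nil => rfl
  | cons z t => simp [PySem.List.insertBy, h z (by simp)]

theorem insertBy_skip {α : Type} (before : α → α → Bool) (x : α) (B rest : List α)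
    (h : ∀ y ∈ B, before x y = false) :
    PySem.List.insertBy before x (B ++ rest) = B ++ PySem.List.insertBy before x rest := by
  induction B with
  | nil => rfl
  | cons y B ih =>
      simp only [List.cons_append, PySem.List.insertBy, h y (by simp), Bool.false_eq_true, if_false]
      rw [ih (fun y hy => h y (by simp [hy]))]

theorem insertBy_append {α : Type} (before : α → α → Bool) (x : α) (B rest : List α)
    (h : ∀ z ∈ rest, before x z = true) :
    PySem.List.insertBy before x (B ++ rest) = PySem.List.insertBy before x B ++ rest := by
  induction B with
  | nil => simp [insertBy_front before x rest h, PySem.List.insertBy]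
  | cons y B ih =>
      cases hxy : before x y with
      | true => simp [PySem.List.insertBy, hxy]
      | false =>
          simp only [List.cons_append, PySem.List.insertBy, hxy, Bool.false_eq_true, if_false]
          rw [ih]

theorem insertBy_congr {α : Type} (before before' : α → α → Bool) (x : α) (B : List α)
    (h : ∀ y ∈ B, before x y = before' x y) :
    PySem.List.insertBy before x B = PySem.List.insertBy before' x B := by
  induction B with
  | nil => rfl
  | cons y B ih =>
      simp only [PySem.List.insertBy, h y (by simp)]
      by_cases hxy : before' x y = true <;>
        simp_all [ih (fun y hy => h y (by simp [hy]))]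

theorem mem_insertBy' {α : Type} (before : α → α → Bool) (x y : α) (B : List α)
    (h : y ∈ PySem.List.insertBy before x B) : y = x ∨ y ∈ B := by
  have := PySem.List.mem_insertBy (before := before) (x := x) (ys := B) (y := y)
  exact this.mp h

-- comparator behaviour across / inside rank blocks
theorem pvLex_true_of_rank_lt (x z : List (String × String)) (h : pvRankB x < pvRankB z) :
    pvLexB x z = true := by simp [pvLexB, h]

theorem pvLex_false_of_rank_gt (x y : List (String × String)) (h : pvRankB y < pvRankB x) :
    pvLexB x y = false := by
  simp only [pvLexB, Bool.or_eq_false_iff, Bool.and_eq_false_iff]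
  constructor
  · simp [not_lt.mpr (le_of_lt h)]
  · left; simp [h]

theorem pvLex_eq_name_of_rank_eq_pos (x y : List (String × String))
    (hr : pvRankB y = pvRankB x) (hx : pvRankB x ≠ 0) :
    pvLexB x y = pvNameB x y := by
  simp [pvLexB, pvNameB, hr, pvSec_of_rank_ne_zero x hx,
    pvSec_of_rank_ne_zero y (by rw [hr]; exact hx)]

theorem pvLex_false_of_rank_zero (x y : List (String × String))
    (hx : pvRankB x = 0) (hy : pvRankB y = 0) :
    pvLexB x y = false := by
  simp [pvLexB, hx, hy, pvSec_of_rank_zero x hx, pvSec_of_rank_zero y hy]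

-- the stable sort of B decomposes into A's five rank blocks
theorem pv_decomp (xs : List (List (String × String))) :
    ∀ (a0 a1 a2 a3 a4 : List (List (String × String))),
    (∀ y ∈ a0, pvRankB y = 0) → (∀ y ∈ a1, pvRankB y = 1) → (∀ y ∈ a2, pvRankB y = 2) →
    (∀ y ∈ a3, pvRankB y = 3) → (∀ y ∈ a4, pvRankB y = 4) →
    xs.foldl (fun acc x => PySem.List.insertBy pvLexB x acc) (a0 ++ a1 ++ a2 ++ a3 ++ a4)
      = (a0 ++ xs.filter (fun c => pvRankB c == 0))
        ++ (xs.filter (fun c => pvRankB c == 1)).foldl (fun acc x => PySem.List.insertBy pvNameB x acc) a1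
        ++ (xs.filter (fun c => pvRankB c == 2)).foldl (fun acc x => PySem.List.insertBy pvNameB x acc) a2
        ++ (xs.filter (fun c => pvRankB c == 3)).foldl (fun acc x => PySem.List.insertBy pvNameB x acc) a3
        ++ (xs.filter (fun c => pvRankB c == 4)).foldl (fun acc x => PySem.List.insertBy pvNameB x acc) a4 := by
  induction xs with
  | nil => intro a0 a1 a2 a3 a4 _ _ _ _ _; simp
  | cons x xs ih =>
      intro a0 a1 a2 a3 a4 h0 h1 h2 h3 h4
      rcases pvRank_cases x with hx | hx | hx | hx | hx
      · -- rank 0: appended at the end of the README block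
        have hstep : PySem.List.insertBy pvLexB x (a0 ++ a1 ++ a2 ++ a3 ++ a4)
            = (a0 ++ [x]) ++ a1 ++ a2 ++ a3 ++ a4 := by
          have hrest : ∀ z ∈ a1 ++ a2 ++ a3 ++ a4, pvLexB x z = true := by
            intro z hz
            simp only [List.mem_append] at hz
            apply pvLex_true_of_rank_lt
            rcases hz with ((hz | hz) | hz) | hz <;>
              first
                | (rw [hx, h1 z hz]; norm_num)
                | (rw [hx, h2 z hz]; norm_num)
                | (rw [hx, h3 z hz]; norm_num)
                | (rw [hx, h4 z hz]; norm_num)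
          have hskip : ∀ y ∈ a0, pvLexB x y = false := fun y hy =>
            pvLex_false_of_rank_zero x y hx (h0 y hy)
          calc PySem.List.insertBy pvLexB x (a0 ++ a1 ++ a2 ++ a3 ++ a4)
              = PySem.List.insertBy pvLexB x (a0 ++ (a1 ++ a2 ++ a3 ++ a4)) := by
                simp [List.append_assoc]
            _ = a0 ++ PySem.List.insertBy pvLexB x (a1 ++ a2 ++ a3 ++ a4) := by
                rw [insertBy_skip _ _ _ _ hskip]
            _ = (a0 ++ [x]) ++ a1 ++ a2 ++ a3 ++ a4 := by
                rw [insertBy_front _ _ _ (by simpa [List.append_assoc] using hrest)]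
                simp [List.append_assoc]
        simp only [List.foldl_cons, hstep, List.filter_cons, hx]
        rw [ih (a0 ++ [x]) a1 a2 a3 a4
          (by intro y hy; rcases List.mem_append.mp hy with hy | hy
              · exact h0 y hy
              · simp at hy; subst hy; exact hx) h1 h2 h3 h4]
        simp [List.append_assoc]
      · -- rank 1
        have hstep : PySem.List.insertBy pvLexB x (a0 ++ a1 ++ a2 ++ a3 ++ a4)
            = a0 ++ (PySem.List.insertBy pvNameB x a1) ++ a2 ++ a3 ++ a4 := by
          have hskip : ∀ y ∈ a0, pvLexB x y = false := fun y hy =>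
            pvLex_false_of_rank_gt x y (by rw [hx, h0 y hy]; norm_num)
          have hrest : ∀ z ∈ a2 ++ a3 ++ a4, pvLexB x z = true := by
            intro z hz; simp only [List.mem_append] at hz
            apply pvLex_true_of_rank_lt
            rcases hz with (hz | hz) | hz <;>
              first
                | (rw [hx, h2 z hz]; norm_num)
                | (rw [hx, h3 z hz]; norm_num)
                | (rw [hx, h4 z hz]; norm_num)
          have hcongr : ∀ y ∈ a1, pvLexB x y = pvNameB x y := fun y hy =>
            pvLex_eq_name_of_rank_eq_pos x y (by rw [hx, h1 y hy]) (by rw [hx]; norm_num)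
          calc PySem.List.insertBy pvLexB x (a0 ++ a1 ++ a2 ++ a3 ++ a4)
              = PySem.List.insertBy pvLexB x (a0 ++ (a1 ++ (a2 ++ a3 ++ a4))) := by
                simp [List.append_assoc]
            _ = a0 ++ PySem.List.insertBy pvLexB x (a1 ++ (a2 ++ a3 ++ a4)) := by
                rw [insertBy_skip _ _ _ _ hskip]
            _ = a0 ++ (PySem.List.insertBy pvLexB x a1 ++ (a2 ++ a3 ++ a4)) := by
                rw [insertBy_append _ _ _ _ (by simpa [List.append_assoc] using hrest)]
            _ = a0 ++ (PySem.List.insertBy pvNameB x a1) ++ a2 ++ a3 ++ a4 := by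
                rw [insertBy_congr _ _ _ _ hcongr]; simp [List.append_assoc]
        simp only [List.foldl_cons, hstep, List.filter_cons, hx]
        rw [ih a0 (PySem.List.insertBy pvNameB x a1) a2 a3 a4 h0
          (by intro y hy; rcases mem_insertBy' _ _ _ _ hy with hy | hy
              · subst hy; exact hx
              · exact h1 y hy) h2 h3 h4]
        simp
      · -- rank 2
        have hstep : PySem.List.insertBy pvLexB x (a0 ++ a1 ++ a2 ++ a3 ++ a4)
            = a0 ++ a1 ++ (PySem.List.insertBy pvNameB x a2) ++ a3 ++ a4 := by
          have hskip : ∀ y ∈ a0 ++ a1, pvLexB x y = false := by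
            intro y hy; simp only [List.mem_append] at hy
            apply pvLex_false_of_rank_gt
            rcases hy with hy | hy
            · rw [hx, h0 y hy]; norm_num
            · rw [hx, h1 y hy]; norm_num
          have hrest : ∀ z ∈ a3 ++ a4, pvLexB x z = true := by
            intro z hz; simp only [List.mem_append] at hz
            apply pvLex_true_of_rank_lt
            rcases hz with hz | hz
            · rw [hx, h3 z hz]; norm_num
            · rw [hx, h4 z hz]; norm_num
          have hcongr : ∀ y ∈ a2, pvLexB x y = pvNameB x y := fun y hy =>
            pvLex_eq_name_of_rank_eq_pos x y (by rw [hx, h2 y hy]) (by rw [hx]; norm_num)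
          calc PySem.List.insertBy pvLexB x (a0 ++ a1 ++ a2 ++ a3 ++ a4)
              = PySem.List.insertBy pvLexB x ((a0 ++ a1) ++ (a2 ++ (a3 ++ a4))) := by
                simp [List.append_assoc]
            _ = (a0 ++ a1) ++ PySem.List.insertBy pvLexB x (a2 ++ (a3 ++ a4)) := by
                rw [insertBy_skip _ _ _ _ hskip]
            _ = (a0 ++ a1) ++ (PySem.List.insertBy pvLexB x a2 ++ (a3 ++ a4)) := by
                rw [insertBy_append _ _ _ _ (by simpa [List.append_assoc] using hrest)]
            _ = a0 ++ a1 ++ (PySem.List.insertBy pvNameB x a2) ++ a3 ++ a4 := by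
                rw [insertBy_congr _ _ _ _ hcongr]; simp [List.append_assoc]
        simp only [List.foldl_cons, hstep, List.filter_cons, hx]
        rw [ih a0 a1 (PySem.List.insertBy pvNameB x a2) a3 a4 h0 h1
          (by intro y hy; rcases mem_insertBy' _ _ _ _ hy with hy | hy
              · subst hy; exact hx
              · exact h2 y hy) h3 h4]
        simp
      · -- rank 3
        have hstep : PySem.List.insertBy pvLexB x (a0 ++ a1 ++ a2 ++ a3 ++ a4)
            = a0 ++ a1 ++ a2 ++ (PySem.List.insertBy pvNameB x a3) ++ a4 := by
          have hskip : ∀ y ∈ a0 ++ a1 ++ a2, pvLexB x y = false := by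
            intro y hy; simp only [List.mem_append] at hy
            apply pvLex_false_of_rank_gt
            rcases hy with (hy | hy) | hy
            · rw [hx, h0 y hy]; norm_num
            · rw [hx, h1 y hy]; norm_num
            · rw [hx, h2 y hy]; norm_num
          have hrest : ∀ z ∈ a4, pvLexB x z = true := fun z hz =>
            pvLex_true_of_rank_lt x z (by rw [hx, h4 z hz]; norm_num)
          have hcongr : ∀ y ∈ a3, pvLexB x y = pvNameB x y := fun y hy =>
            pvLex_eq_name_of_rank_eq_pos x y (by rw [hx, h3 y hy]) (by rw [hx]; norm_num)
          calc PySem.List.insertBy pvLexB x (a0 ++ a1 ++ a2 ++ a3 ++ a4)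
              = PySem.List.insertBy pvLexB x ((a0 ++ a1 ++ a2) ++ (a3 ++ a4)) := by
                simp [List.append_assoc]
            _ = (a0 ++ a1 ++ a2) ++ PySem.List.insertBy pvLexB x (a3 ++ a4) := by
                rw [insertBy_skip _ _ _ _ hskip]
            _ = (a0 ++ a1 ++ a2) ++ (PySem.List.insertBy pvLexB x a3 ++ a4) := by
                rw [insertBy_append _ _ _ _ hrest]
            _ = a0 ++ a1 ++ a2 ++ (PySem.List.insertBy pvNameB x a3) ++ a4 := by
                rw [insertBy_congr _ _ _ _ hcongr]; simp [List.append_assoc]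
        simp only [List.foldl_cons, hstep, List.filter_cons, hx]
        rw [ih a0 a1 a2 (PySem.List.insertBy pvNameB x a3) a4 h0 h1 h2
          (by intro y hy; rcases mem_insertBy' _ _ _ _ hy with hy | hy
              · subst hy; exact hx
              · exact h3 y hy) h4]
        simp
      · -- rank 4
        have hstep : PySem.List.insertBy pvLexB x (a0 ++ a1 ++ a2 ++ a3 ++ a4)
            = a0 ++ a1 ++ a2 ++ a3 ++ (PySem.List.insertBy pvNameB x a4) := by
          have hskip : ∀ y ∈ a0 ++ a1 ++ a2 ++ a3, pvLexB x y = false := by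
            intro y hy; simp only [List.mem_append] at hy
            apply pvLex_false_of_rank_gt
            rcases hy with ((hy | hy) | hy) | hy
            · rw [hx, h0 y hy]; norm_num
            · rw [hx, h1 y hy]; norm_num
            · rw [hx, h2 y hy]; norm_num
            · rw [hx, h3 y hy]; norm_num
          have hcongr : ∀ y ∈ a4, pvLexB x y = pvNameB x y := fun y hy =>
            pvLex_eq_name_of_rank_eq_pos x y (by rw [hx, h4 y hy]) (by rw [hx]; norm_num)
          calc PySem.List.insertBy pvLexB x (a0 ++ a1 ++ a2 ++ a3 ++ a4)
              = PySem.List.insertBy pvLexB x ((a0 ++ a1 ++ a2 ++ a3) ++ a4) := by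
                simp [List.append_assoc]
            _ = (a0 ++ a1 ++ a2 ++ a3) ++ PySem.List.insertBy pvLexB x a4 := by
                rw [insertBy_skip _ _ _ _ hskip]
            _ = a0 ++ a1 ++ a2 ++ a3 ++ (PySem.List.insertBy pvNameB x a4) := by
                rw [insertBy_congr _ _ _ _ hcongr]
        simp only [List.foldl_cons, hstep, List.filter_cons, hx]
        rw [ih a0 a1 a2 a3 (PySem.List.insertBy pvNameB x a4) h0 h1 h2 h3
          (by intro y hy; rcases mem_insertBy' _ _ _ _ hy with hy | hy
              · subst hy; exact hx
              · exact h4 y hy)]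
        simp

-- each rank filter of B's filtered list is one of A's nested groups (pointwise boolean facts)
theorem pv_grp0 (children : List (List (String × String))) :
    (children.filter (fun c => pvGetS c "type" == "file" || pvGetS c "type" == "directory")).filter
        (fun c => pvRankB c == 0)
      = (children.filter (fun c => pvGetS c "type" == "file")).filter
          (fun f => PySem.Str.lower (pvGetS f "name") == "readme.md") := by
  rw [List.filter_filter, List.filter_filter]
  refine List.filter_congr ?_
  intro c _
  rcases eq_or_ne (pvGetS c "type") "file" with ht | ht <;>
    rcases eq_or_ne (PySem.Str.lower (pvGetS c "name")) "readme.md" with hr | hr <;>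
    by_cases hs : PySem.Chars.startswith (pvGetS c "name").toList ['.'] = true <;>
    simp [pvRankB, ht, hr, hs]

theorem pv_grp1 (children : List (List (String × String))) :
    (children.filter (fun c => pvGetS c "type" == "file" || pvGetS c "type" == "directory")).filter
        (fun c => pvRankB c == 1)
      = ((children.filter (fun c => pvGetS c "type" == "file")).filter
          (fun f => !(PySem.Str.lower (pvGetS f "name") == "readme.md"))).filter
          (fun f => !(PySem.Str.startswith (pvGetS f "name") ".")) := by
  rw [List.filter_filter, List.filter_filter, List.filter_filter]
  refine List.filter_congr ?_
  intro c _
  rcases eq_or_ne (pvGetS c "type") "file" with ht | ht <;>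
    rcases eq_or_ne (PySem.Str.lower (pvGetS c "name")) "readme.md" with hr | hr <;>
    by_cases hs : PySem.Chars.startswith (pvGetS c "name").toList ['.'] = true <;>
    simp [pvRankB, ht, hr, hs]

theorem pv_grp2 (children : List (List (String × String))) :
    (children.filter (fun c => pvGetS c "type" == "file" || pvGetS c "type" == "directory")).filter
        (fun c => pvRankB c == 2)
      = ((children.filter (fun c => pvGetS c "type" == "file")).filter
          (fun f => !(PySem.Str.lower (pvGetS f "name") == "readme.md"))).filter
          (fun f => PySem.Str.startswith (pvGetS f "name") ".") := by
  rw [List.filter_filter, List.filter_filter, List.filter_filter]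
  refine List.filter_congr ?_
  intro c _
  rcases eq_or_ne (pvGetS c "type") "file" with ht | ht <;>
    rcases eq_or_ne (PySem.Str.lower (pvGetS c "name")) "readme.md" with hr | hr <;>
    by_cases hs : PySem.Chars.startswith (pvGetS c "name").toList ['.'] = true <;>
    simp [pvRankB, ht, hr, hs]

theorem pv_grp3 (children : List (List (String × String))) :
    (children.filter (fun c => pvGetS c "type" == "file" || pvGetS c "type" == "directory")).filter
        (fun c => pvRankB c == 3)
      = (children.filter (fun c => pvGetS c "type" == "directory")).filter
          (fun d => !(PySem.Str.startswith (pvGetS d "name") ".")) := by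
  rw [List.filter_filter, List.filter_filter]
  refine List.filter_congr ?_
  intro c _
  rcases eq_or_ne (pvGetS c "type") "file" with ht | ht <;>
    rcases eq_or_ne (pvGetS c "type") "directory" with hd | hd <;>
    rcases eq_or_ne (PySem.Str.lower (pvGetS c "name")) "readme.md" with hr | hr <;>
    by_cases hs : PySem.Chars.startswith (pvGetS c "name").toList ['.'] = true <;>
    simp_all [pvRankB]

theorem pv_grp4 (children : List (List (String × String))) :
    (children.filter (fun c => pvGetS c "type" == "file" || pvGetS c "type" == "directory")).filter
        (fun c => pvRankB c == 4)
      = (children.filter (fun c => pvGetS c "type" == "directory")).filter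
          (fun d => PySem.Str.startswith (pvGetS d "name") ".") := by
  rw [List.filter_filter, List.filter_filter]
  refine List.filter_congr ?_
  intro c _
  rcases eq_or_ne (pvGetS c "type") "file" with ht | ht <;>
    rcases eq_or_ne (pvGetS c "type") "directory" with hd | hd <;>
    rcases eq_or_ne (PySem.Str.lower (pvGetS c "name")) "readme.md" with hr | hr <;>
    by_cases hs : PySem.Chars.startswith (pvGetS c "name").toList ['.'] = true <;>
    simp_all [pvRankB]

-- ===== VERDICT (by name: the statement is the Claim_ definition above) =====
theorem sort_children_py_spec : Claim_equal_sort_children_py := by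
  intro children _ _
  unfold Spec_sort_children_py
  simp only [sort_children_py, sort_children_py_alt]
  have hB : PySem.List.sorted2
      (children.filter (fun c => pvGetS c "type" == "file" || pvGetS c "type" == "directory"))
      pvRankB pvSecB false
      = (children.filter (fun c => pvGetS c "type" == "file" || pvGetS c "type" == "directory")).foldl
          (fun acc x => PySem.List.insertBy pvLexB x acc) [] := rfl
  rw [hB]
  have hD := pv_decomp
    (children.filter (fun c => pvGetS c "type" == "file" || pvGetS c "type" == "directory"))
    [] [] [] [] [] (by intro y hy; simp at hy) (by intro y hy; simp at hy) (by intro y hy; simp at hy) (by intro y hy; simp at hy) (by intro y hy; simp at hy)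
  simp only [List.append_nil, List.nil_append] at hD
  rw [hD]
  have hname : ∀ (L : List (List (String × String))),
      L.foldl (fun acc x => PySem.List.insertBy pvNameB x acc) []
        = PySem.List.sorted L (fun x => pvGetS x "name") false := fun L => rfl
  rw [hname, hname, hname, hname, pv_grp0, pv_grp1, pv_grp2, pv_grp3, pv_grp4]
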